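-- pv_equiv track=rewrite | github.com/suhanchoi/Algorithm | 코딩테스트/가비아/2.py | solution
-- ===== SOURCE A (Python) =====
-- def solution(p):
--     answer = 0
--
--     for i in range(len(p)):
--         if p[i] == "<":
--             answer += 1
--             continue
--         break
--     for i in range(len(p)-1,-1,-1):
--         if p[i] == ">":
--             answer += 1
--             continue
--         break
--     return answer
-- ===== SOURCE B (Python) =====
-- def solution(p):
--     # Peel both ends simultaneously: each step removes one leading '<' and/or
--     # one trailing '>' (they are distinct characters, so the two runs never
--     # share a position) and recurses on the shrunken middle.
--     if p and p[0] == "<" and p[-1] == ">":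
--         return 2 + solution(p[1:-1])
--     if p and p[0] == "<":
--         return 1 + solution(p[1:])
--     if p and p[-1] == ">":
--         return 1 + solution(p[:-1])
--     return 0
-- ===== Notes on version B (the rewrite author's own statement) =====
-- stated objective: alternative
-- what changed: Replaces A's two staged one-directional index-and-break loops by a single recursion that peels both ends of the string at once (one leading '<' and/or one trailing '>' per step) and recurses on the middle.
import Mathlib
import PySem

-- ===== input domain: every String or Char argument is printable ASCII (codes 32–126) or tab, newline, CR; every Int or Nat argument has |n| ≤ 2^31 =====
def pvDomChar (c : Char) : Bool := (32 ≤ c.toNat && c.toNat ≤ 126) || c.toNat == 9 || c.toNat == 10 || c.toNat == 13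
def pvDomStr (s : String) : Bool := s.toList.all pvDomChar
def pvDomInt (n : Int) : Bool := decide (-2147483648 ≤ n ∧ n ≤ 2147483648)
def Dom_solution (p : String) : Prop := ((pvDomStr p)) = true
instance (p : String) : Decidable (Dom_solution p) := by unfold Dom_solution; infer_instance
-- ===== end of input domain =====

-- B replaces A's two staged index-and-break loops by a single recursion peeling both
-- ends of the string at once (objective: alternative; same value on all strings).


-- ===== PORT A =====
-- first loop of A: scan forward, count '<' until the first other character (break)
def solFwd : List Char → Int
  | [] => 0
  | c :: cs => if c = '<' then 1 + solFwd cs else 0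

-- second loop of A: iterate i = len-1 … 0, count '>' until break;
-- iterating indices downward is iterating the reversed character list
def solBwd : List Char → Int
  | [] => 0
  | c :: cs => if c = '>' then 1 + solBwd cs else 0

def solution (p : String) : Int :=
  solFwd p.toList + solBwd p.toList.reverse

-- ===== PORT B =====
-- Source B's recursion: p[0] → head?, p[-1] → getLast?, p[1:-1]/p[1:]/p[:-1] → drop/dropLast
def bgo (l : List Char) : Int :=
  if l ≠ [] ∧ l.head? = some '<' ∧ l.getLast? = some '>' then
    2 + bgo ((l.drop 1).dropLast)
  else if l ≠ [] ∧ l.head? = some '<' then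
    1 + bgo (l.drop 1)
  else if l ≠ [] ∧ l.getLast? = some '>' then
    1 + bgo l.dropLast
  else 0
termination_by l.length
decreasing_by
  · have h0 : l.length ≠ 0 := by
      simpa [List.length_eq_zero_iff] using (by tauto : l ≠ [])
    have h1 : ((l.drop 1).dropLast).length = (l.drop 1).length - 1 :=
      List.length_dropLast
    simp at h1 ⊢; omega
  · have h0 : l.length ≠ 0 := by
      simpa [List.length_eq_zero_iff] using (by tauto : l ≠ [])
    simp; omega
  · have h0 : l.length ≠ 0 := by
      simpa [List.length_eq_zero_iff] using (by tauto : l ≠ [])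
    have h1 : (l.dropLast).length = l.length - 1 := List.length_dropLast
    simp at h1 ⊢; omega

def solution_alt (p : String) : Int := bgo p.toList

-- ===== PRECONDITION & SPEC =====
def Spec_solution (p : String) (out : Int) : Prop := out = solution_alt p
instance (p : String) (out : Int) : Decidable (Spec_solution p out) := by unfold Spec_solution; infer_instance

-- ===== CLAIM (what is proved, stated in full; the proofs are below) =====
def Claim_equal_solution : Prop := ∀ (p : String), Dom_solution p → Spec_solution p (solution p)

-- ===== LEMMAS AND PROOFS =====
theorem dropLast_append_getLast?' {α : Type} :
    ∀ {l : List α} {x : α}, l.getLast? = some x → l.dropLast ++ [x] = l := by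
  intro l
  induction l with
  | nil => intro x h; simp at h
  | cons c cs ih =>
    intro x h
    cases cs with
    | nil => simp at h ⊢; exact h.symm
    | cons d ds =>
      have h' : (d :: ds).getLast? = some x := by simpa using h
      simpa using ih h'

theorem bgo_both {l : List Char} (h1 : l.head? = some '<') (h2 : l.getLast? = some '>') :
    bgo l = 2 + bgo ((l.drop 1).dropLast) := by
  have hne : l ≠ [] := by intro e; subst e; simp at h1
  rw [bgo, if_pos ⟨hne, h1, h2⟩]

theorem bgo_front {l : List Char} (h1 : l.head? = some '<') (h2 : l.getLast? ≠ some '>') :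
    bgo l = 1 + bgo (l.drop 1) := by
  have hne : l ≠ [] := by intro e; subst e; simp at h1
  rw [bgo, if_neg (by tauto), if_pos ⟨hne, h1⟩]

theorem bgo_back {l : List Char} (h1 : l.head? ≠ some '<') (h2 : l.getLast? = some '>') :
    bgo l = 1 + bgo l.dropLast := by
  have hne : l ≠ [] := by intro e; subst e; simp at h2
  rw [bgo, if_neg (by tauto), if_neg (by tauto), if_pos ⟨hne, h2⟩]

theorem bgo_none {l : List Char} (h1 : l.head? ≠ some '<') (h2 : l.getLast? ≠ some '>') :
    bgo l = 0 := by
  rw [bgo, if_neg (by tauto), if_neg (by tauto), if_neg (by tauto)]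

theorem solFwd_append_last (m : List Char) (x : Char) (hx : x ≠ '<') :
    solFwd (m ++ [x]) = solFwd m := by
  induction m with
  | nil => simp [solFwd, hx]
  | cons c cs ih => by_cases h : c = '<' <;> simp [solFwd, h, ih]

theorem solBwd_append_last (m : List Char) (x : Char) (hx : x ≠ '>') :
    solBwd (m ++ [x]) = solBwd m := by
  induction m with
  | nil => simp [solBwd, hx]
  | cons c cs ih => by_cases h : c = '>' <;> simp [solBwd, h, ih]

theorem bgo_eq : ∀ (n : ℕ) (l : List Char), l.length ≤ n →
    bgo l = solFwd l + solBwd l.reverse := by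
  intro n
  induction n with
  | zero =>
    intro l hl
    have hnil : l = [] := by
      cases l with | nil => rfl | cons c cs => simp at hl
    subst hnil; simp [bgo, solFwd, solBwd]
  | succ n ih =>
    intro l hl
    cases l with
    | nil => simp [bgo, solFwd, solBwd]
    | cons c cs =>
      by_cases hc : c = '<'
      · subst hc
        by_cases hg : (('<' :: cs).getLast? = some '>')
        · -- both ends fire; cs ≠ [] since the single '<' cannot also be '>'
          have hcs : cs ≠ [] := by intro e; subst e; simp at hg
          have hlast : cs.getLast? = some '>' := by
            cases cs with
            | nil => exact absurd rfl hcs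
            | cons d ds => simpa using hg
          have hdecomp : cs.dropLast ++ ['>'] = cs := dropLast_append_getLast?' hlast
          rw [bgo_both (by rfl) hg]
          have hlen : cs.dropLast.length ≤ n := by
            have h1 : cs.dropLast.length = cs.length - 1 := List.length_dropLast
            simp at hl; omega
          simp only [List.drop_one, List.tail_cons]
          rw [ih _ hlen]
          have hF : solFwd ('<' :: cs) = 1 + solFwd cs.dropLast := by
            conv_lhs => rw [← hdecomp]
            simp [solFwd, solFwd_append_last cs.dropLast '>' (by decide)]
          have hB : solBwd ('<' :: cs).reverse = 1 + solBwd cs.dropLast.reverse := by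
            conv_lhs => rw [← hdecomp]
            simp [solBwd, solBwd_append_last _ '<' (by decide)]
          rw [hF, hB]; ring
        · -- only the front fires
          rw [bgo_front (by rfl) hg]
          have hlen : cs.length ≤ n := by simp at hl; omega
          simp only [List.drop_one, List.tail_cons]
          rw [ih _ hlen]
          have hF : solFwd ('<' :: cs) = 1 + solFwd cs := by simp [solFwd]
          have hB : solBwd ('<' :: cs).reverse = solBwd cs.reverse := by
            simp only [List.reverse_cons]
            exact solBwd_append_last _ '<' (by decide)
          rw [hF, hB]; ring
      · -- head is not '<'
        have hh : (c :: cs).head? ≠ some '<' := by simpa using hc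
        have hF : solFwd (c :: cs) = 0 := by simp [solFwd, hc]
        by_cases hg : ((c :: cs).getLast? = some '>')
        · rw [bgo_back hh hg]
          have hdecomp : (c :: cs).dropLast ++ ['>'] = c :: cs :=
            dropLast_append_getLast?' hg
          have hlen : (c :: cs).dropLast.length ≤ n := by
            have h1 : (c :: cs).dropLast.length = cs.length := by simp
            simp at hl; omega
          rw [ih _ hlen]
          have hF' : solFwd (c :: cs).dropLast = 0 := by
            cases hdl : (c :: cs).dropLast with
            | nil => simp [solFwd]
            | cons d ds =>
              have hd : d = c := by
                have h2 := congrArg List.head? hdecomp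
                simp [hdl] at h2; exact h2
              subst hd; simp [solFwd, hc]
          have hB : solBwd (c :: cs).reverse = 1 + solBwd (c :: cs).dropLast.reverse := by
            conv_lhs => rw [← hdecomp]
            simp [solBwd]
          rw [hB, hF, hF']; ring
        · rw [bgo_none hh hg]
          have hB : solBwd (c :: cs).reverse = 0 := by
            cases hr : (c :: cs).reverse with
            | nil => simp [solBwd]
            | cons d ds =>
              have hd : (c :: cs).getLast? = some d := by
                rw [List.getLast?_eq_head?_reverse, hr]; rfl
              have hd' : d ≠ '>' := by intro e; subst e; exact hg hd
              simp [solBwd, hd']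
          rw [hF, hB]; ring

-- ===== VERDICT (by name: the statement is the Claim_ definition above) =====
theorem solution_spec : Claim_equal_solution := by
  intro p _
  unfold Spec_solution solution solution_alt
  rw [bgo_eq p.toList.length p.toList le_rfl]
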